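-- pv_equiv track=rewrite | github.com/Igrekess/PT_CHEMISTRY | ptc/explorer.py | _generate_formulas
-- ===== SOURCE A (Python) =====
-- from typing import Dict, List, Optional
--
-- def _generate_formulas(elements: List[str], max_atoms: int,
--                        min_atoms: int = 2) -> List[Dict[str, int]]:
--     """Generate all molecular formulas with given elements and atom count.
--
--     Returns list of dicts like {'C': 2, 'H': 6, 'O': 1}.
--     """
--     n_el = len(elements)
--     formulas = []
--
--     # Generate all combinations of atom counts
--     for total in range(min_atoms, max_atoms + 1):
--         # Enumerate partitions of 'total' atoms into n_el bins (at least 1 each)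
--         def _partition(remaining, idx, current):
--             if idx == n_el - 1:
--                 current[elements[idx]] = remaining
--                 if remaining >= 0:
--                     formulas.append(dict(current))
--                 return
--             for count in range(0, remaining + 1):
--                 current[elements[idx]] = count
--                 _partition(remaining - count, idx + 1, current)
--
--         _partition(total, 0, {})
--
--     # Filter: must have at least one heavy atom (not just H)
--     valid = []
--     for f in formulas:
--         n_heavy = sum(v for k, v in f.items() if k != 'H')
--         n_total = sum(f.values())
--         if n_heavy >= 1 and n_total >= min_atoms:
--             # Remove zero-count elements
--             clean = {k: v for k, v in f.items() if v > 0}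
--             if clean:
--                 valid.append(clean)
--     return valid
-- ===== SOURCE B (Python) =====
-- from itertools import product
--
--
-- def _generate_formulas(elements, max_atoms, min_atoms=2):
--     """Generate all molecular formulas by direct product enumeration (no recursion)."""
--     valid = []
--     n = len(elements)
--     for total in range(min_atoms, max_atoms + 1):
--         for tup in product(range(total + 1), repeat=n):
--             if sum(tup) != total:
--                 continue
--             f = dict(zip(elements, tup))
--             s = sum(f.values())
--             if s - f.get('H', 0) >= 1 and s >= min_atoms:
--                 clean = {k: v for k, v in f.items() if v > 0}
--                 if clean:
--                     valid.append(clean)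
--     return valid
-- ===== Notes on version B (the rewrite author's own statement) =====
-- stated objective: alternative
-- what changed: Replaces A's recursive backtracking partition generator (a closure mutating a shared dict and appending to a shared list, followed by a separate filter pass over all formulas) with a non-recursive itertools.product enumeration filtered by sum, building each dict fresh with dict(zip(...)) and filtering inline (n_heavy computed as sum(f.values()) - f.get('H', 0)).
import Mathlib
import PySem

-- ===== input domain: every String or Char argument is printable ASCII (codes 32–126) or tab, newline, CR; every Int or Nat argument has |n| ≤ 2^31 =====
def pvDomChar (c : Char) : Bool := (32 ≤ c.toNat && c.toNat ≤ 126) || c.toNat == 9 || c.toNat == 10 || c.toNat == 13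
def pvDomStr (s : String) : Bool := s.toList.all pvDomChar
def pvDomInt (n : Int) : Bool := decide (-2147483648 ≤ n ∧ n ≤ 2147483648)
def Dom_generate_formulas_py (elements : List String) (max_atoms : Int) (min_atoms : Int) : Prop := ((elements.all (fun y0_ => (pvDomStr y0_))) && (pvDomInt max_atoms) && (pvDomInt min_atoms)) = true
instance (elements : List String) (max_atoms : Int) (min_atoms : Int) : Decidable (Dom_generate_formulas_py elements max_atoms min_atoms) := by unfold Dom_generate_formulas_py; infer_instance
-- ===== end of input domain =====

-- B replaces A's recursive backtracking partition generator (with a shared mutable dict and a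
-- post-hoc filter pass) by a direct product-enumeration with an inline filter: same return value.


-- ===== PORT A =====
-- `_partition(remaining, idx, current)`: recursion on idx, terminated by fuel = n_el - idx;
-- the shared mutable `current` dict and `formulas` list are threaded through and returned.
-- The `none` branches of pyGet? are where Python raises IndexError (elements = []): excluded by Pre_.
def pvPartA (elements : List String) (fuel : Nat) (remaining : Int) (idx : Int)
    (cur : PySem.Dict String Int) (formulas : List (List (String × Int))) :
    PySem.Dict String Int × List (List (String × Int)) :=
  match fuel with
  | 0 => (cur, formulas)
  | fuel1+1 =>
    if idx = PySem.List.len elements - 1 then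
      match PySem.List.pyGet? elements idx with
      | none => (cur, formulas)
      | some e =>
        let cur2 := cur.insert e remaining
        if remaining ≥ 0 then (cur2, formulas ++ [cur2.items]) else (cur2, formulas)
    else
      match PySem.List.pyGet? elements idx with
      | none => (cur, formulas)
      | some e =>
        (PySem.List.pyRange 0 (remaining + 1) 1).foldl
          (fun st count => pvPartA elements fuel1 (remaining - count) (idx + 1) (st.1.insert e count) st.2)
          (cur, formulas)

def generate_formulas_py (elements : List String) (max_atoms : Int) (min_atoms : Int) : List (List (String × Int)) :=
  let formulas := (PySem.List.pyRange min_atoms (max_atoms + 1) 1).foldl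
    (fun fs total => (pvPartA elements elements.length total 0 PySem.Dict.empty fs).2) ([] : List (List (String × Int)))
  formulas.foldl (fun (valid : List (List (String × Int))) (f : List (String × Int)) =>
    let n_heavy := f.foldl (fun s kv => if kv.1 ≠ "H" then s + kv.2 else s) (0 : Int)
    let n_total := f.foldl (fun s kv => s + kv.2) (0 : Int)
    if n_heavy ≥ 1 ∧ n_total ≥ min_atoms then
      let clean := f.filter (fun kv => kv.2 > 0)
      if clean ≠ [] then valid ++ [clean] else valid
    else valid) ([] : List (List (String × Int)))

-- ===== PORT B =====
-- itertools.product(range(total+1), repeat=n), lexicographic (first coordinate slowest).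
def pvProdB (vals : List Int) (n : Nat) : List (List Int) :=
  match n with
  | 0 => [[]]
  | n1+1 => vals.flatMap (fun v => (pvProdB vals n1).map (v :: ·))

def generate_formulas_py_alt (elements : List String) (max_atoms : Int) (min_atoms : Int) : List (List (String × Int)) :=
  (PySem.List.pyRange min_atoms (max_atoms + 1) 1).foldl (fun valid total =>
    (pvProdB (PySem.List.pyRange 0 (total + 1) 1) elements.length).foldl (fun (valid : List (List (String × Int))) (tup : List Int) =>
      if tup.sum = total then
        let f := (elements.zip tup).foldl (fun d kv => d.insert kv.1 kv.2) PySem.Dict.empty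
        let s := f.values.sum
        if s - f.getD "H" 0 ≥ 1 ∧ s ≥ min_atoms then
          let clean := f.items.filter (fun kv => kv.2 > 0)
          if clean ≠ [] then valid ++ [clean] else valid
        else valid
      else valid) valid) ([] : List (List (String × Int)))

-- ===== PRECONDITION & SPEC =====
-- Pre_ excludes exactly the inputs where A raises: elements = [] while the total-loop runs
-- (min_atoms ≤ max_atoms), on which `elements[idx]` raises IndexError.
def Pre_generate_formulas_py (elements : List String) (max_atoms : Int) (min_atoms : Int) : Prop :=
  elements ≠ [] ∨ max_atoms < min_atoms
instance (elements : List String) (max_atoms : Int) (min_atoms : Int) : Decidable (Pre_generate_formulas_py elements max_atoms min_atoms) := by unfold Pre_generate_formulas_py; infer_instance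

def pvWitness_generate_formulas_py : List String × Int × Int := (["C", "H"], 3, 2)

def Spec_generate_formulas_py (elements : List String) (max_atoms : Int) (min_atoms : Int) (out : List (List (String × Int))) : Prop := out = generate_formulas_py_alt elements max_atoms min_atoms
instance (elements : List String) (max_atoms : Int) (min_atoms : Int) (out : List (List (String × Int))) : Decidable (Spec_generate_formulas_py elements max_atoms min_atoms out) := by unfold Spec_generate_formulas_py; infer_instance

-- ===== CLAIM (what is proved, stated in full; the proofs are below) =====
def Claim_equal_generate_formulas_py : Prop := ∀ (elements : List String) (max_atoms : Int) (min_atoms : Int), Dom_generate_formulas_py elements max_atoms min_atoms → Pre_generate_formulas_py elements max_atoms min_atoms → Spec_generate_formulas_py elements max_atoms min_atoms (generate_formulas_py elements max_atoms min_atoms)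

-- ===== LEMMAS AND PROOFS =====

def pvW (d : PySem.Dict String Int) (ps : List (String × Int)) : PySem.Dict String Int :=
  ps.foldl (fun d kv => d.insert kv.1 kv.2) d

def pvLast (ps : List (String × Int)) (k : String) : Option Int :=
  ps.foldl (fun a p => if p.1 = k then some p.2 else a) none

lemma pvW_cons (d : PySem.Dict String Int) (p : String × Int) (ps : List (String × Int)) :
    pvW d (p :: ps) = pvW (d.insert p.1 p.2) ps := rfl

lemma pvLast_foldl (ps : List (String × Int)) (k : String) (o : Option Int) :
    ps.foldl (fun a p => if p.1 = k then some p.2 else a) o = (pvLast ps k).or o := by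
  induction ps generalizing o with
  | nil => simp [pvLast]
  | cons p ps ih =>
    simp only [List.foldl_cons, pvLast]
    rw [ih, ih (if p.1 = k then some p.2 else none)]
    rcases h : pvLast ps k with _ | v <;> split_ifs <;> simp

lemma get?_pvW (d : PySem.Dict String Int) (ps : List (String × Int)) (k : String) :
    (pvW d ps).get? k = (pvLast ps k).or (d.get? k) := by
  induction ps generalizing d with
  | nil => simp [pvW, pvLast]
  | cons p ps ih =>
    rw [pvW_cons, ih]
    have hps : pvLast (p :: ps) k = (pvLast ps k).or (if p.1 = k then some p.2 else none) := by
      unfold pvLast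
      rw [List.foldl_cons, pvLast_foldl]; rfl
    rw [hps, PySem.Dict.get?_insert]
    rcases pvLast ps k with _ | v
    · by_cases hpk : p.1 = k
      · simp [hpk]
      · rw [if_neg (fun h => hpk h.symm), if_neg hpk]
        simp
    · simp

lemma keys_pvW (d : PySem.Dict String Int) (ps : List (String × Int)) :
    (pvW d ps).keys = PySem.Set.update d.keys (ps.map Prod.fst) := by
  exact PySem.Dict.keys_foldl_insert_key ps Prod.fst (fun _ kv => kv.2) d

lemma nodup_keys_pvW (d : PySem.Dict String Int) (ps : List (String × Int))
    (h : d.keys.Nodup) : (pvW d ps).keys.Nodup :=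
  PySem.Dict.nodup_keys_foldl_insert_key ps Prod.fst (fun _ kv => kv.2) d h

lemma pvDict_ext (d1 d2 : PySem.Dict String Int) (h1 : d1.keys.Nodup)
    (hk : d1.keys = d2.keys) (hg : ∀ k, d1.get? k = d2.get? k) : d1 = d2 := by
  apply PySem.Dict.ext
  rw [PySem.Dict.items_eq_map_keys d1 h1 0, PySem.Dict.items_eq_map_keys d2 (hk ▸ h1) 0, hk]
  exact List.map_congr_left (fun k _ => by
    rw [PySem.Dict.getD_eq_get?_getD, PySem.Dict.getD_eq_get?_getD, hg k])

lemma pvLast_zip_none_iff (ks : List String) (vs : List Int) (k : String)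
    (h : vs.length = ks.length) : pvLast (ks.zip vs) k = none ↔ k ∉ ks := by
  induction ks generalizing vs with
  | nil => simp [pvLast]
  | cons a ks ih =>
    rcases vs with _ | ⟨v, vs⟩
    · simp at h
    · simp only [List.length_cons, Nat.add_right_cancel_iff] at h
      have hps : pvLast ((a :: ks).zip (v :: vs)) k
          = (pvLast (ks.zip vs) k).or (if a = k then some v else none) := by
        unfold pvLast
        rw [List.zip_cons_cons, List.foldl_cons, pvLast_foldl]; rfl
      rw [hps, Option.or_eq_none_iff, ih vs h, List.mem_cons]
      constructor
      · rintro ⟨h1, h2⟩ hor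
        rcases hor with hk | hk
        · rw [if_pos hk.symm] at h2; exact absurd h2 (by simp)
        · exact h1 hk
      · intro hm
        refine ⟨fun hk => hm (Or.inr hk), ?_⟩
        rw [if_neg (fun hh => hm (Or.inl hh.symm))]

lemma pvSet_update_idem (s : PySem.Set String) (l : List String) :
    PySem.Set.update (PySem.Set.update s l) l = PySem.Set.update s l := by
  rw [PySem.Set.update_eq_append_filter (PySem.Set.update s l) l]
  have : List.filter (fun y => !(PySem.Set.update s l).contains y) (PySem.Set.ofList l) = [] := by
    rw [List.filter_eq_nil_iff]
    intro a ha
    have hmem : a ∈ PySem.Set.update s l := by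
      rw [PySem.Set.mem_update]; right; exact (PySem.Set.mem_ofList l a).1 ha
    have hc := (PySem.Set.contains_iff (PySem.Set.update s l) a).2 hmem
    simp only [hc, Bool.not_true, Bool.false_eq_true, not_false_eq_true]
  rw [this, List.append_nil]

lemma pvOW (d : PySem.Dict String Int) (ks : List String) (vs vs' : List Int)
    (hnd : d.keys.Nodup) (h' : vs'.length = ks.length) (h : vs.length = ks.length) :
    pvW (pvW d (ks.zip vs')) (ks.zip vs) = pvW d (ks.zip vs) := by
  have hmf : ∀ (ws : List Int), ws.length = ks.length →
      (ks.zip ws).map Prod.fst = ks := fun ws hw => List.map_fst_zip (by omega)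
  apply pvDict_ext
  · exact nodup_keys_pvW _ _ (nodup_keys_pvW _ _ hnd)
  · rw [keys_pvW, keys_pvW, keys_pvW, hmf vs h, hmf vs' h', pvSet_update_idem]
  · intro k
    rw [get?_pvW, get?_pvW, get?_pvW]
    rcases hl : pvLast (ks.zip vs) k with _ | v
    · have hk : k ∉ ks := (pvLast_zip_none_iff ks vs k h).1 hl
      rw [(pvLast_zip_none_iff ks vs' k h').2 hk]
      simp
    · simp

def pvCanon (r : Int) (k : Nat) : List (List Int) :=
  match k with
  | 0 => if r = 0 then [[]] else []
  | k1+1 => (PySem.List.pyRange 0 (r + 1) 1).flatMap (fun c => (pvCanon (r - c) k1).map (c :: ·))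

lemma pvRange_nil {a b : Int} (h : b ≤ a) : PySem.List.pyRange a b 1 = [] := by
  simp [PySem.List.pyRange]; omega

lemma pvCanon_neg (r : Int) (k : Nat) (h : r < 0) : pvCanon r k = [] := by
  cases k with
  | zero => simp [pvCanon]; omega
  | succ k1 => rw [pvCanon, pvRange_nil (by omega)]; rfl

lemma pvCanon_length (r : Int) (k : Nat) : ∀ t ∈ pvCanon r k, t.length = k := by
  induction k generalizing r with
  | zero => intro t ht; simp [pvCanon] at ht; simp [ht.2]
  | succ k1 ih =>
    intro t ht
    rw [pvCanon, List.mem_flatMap] at ht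
    obtain ⟨c, _, ht⟩ := ht
    rw [List.mem_map] at ht
    obtain ⟨t', ht', rfl⟩ := ht
    simp [ih _ _ ht']

lemma pvCanon_one (r : Int) (h : 0 ≤ r) : pvCanon r 1 = [[r]] := by
  rw [pvCanon, PySem.List.pyRange_one_succ_right h]
  rw [List.flatMap_append]
  have h1 : (PySem.List.pyRange 0 r 1).flatMap (fun c => (pvCanon (r - c) 0).map (c :: ·)) = [] := by
    rw [List.flatMap_eq_nil_iff]
    intro c hc
    have := PySem.List.mem_pyRange_one.1 hc
    rw [show pvCanon (r - c) 0 = if r - c = 0 then [[]] else [] from rfl, if_neg (by omega)]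
    rfl
  rw [h1]
  simp [pvCanon]

lemma pvProdB_sum_nonneg (t : Int) (k : Nat) :
    ∀ l ∈ pvProdB (PySem.List.pyRange 0 (t + 1) 1) k, 0 ≤ l.sum := by
  induction k with
  | zero => intro l hl; simp [pvProdB] at hl; simp [hl]
  | succ k1 ih =>
    intro l hl
    rw [pvProdB, List.mem_flatMap] at hl
    obtain ⟨v, hv, hl⟩ := hl
    rw [List.mem_map] at hl
    obtain ⟨l', hl', rfl⟩ := hl
    have hv' := PySem.List.mem_pyRange_one.1 hv
    have := ih l' hl'
    simp only [List.sum_cons]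
    omega

lemma pvFilterProd (t : Int) (k : Nat) :
    ∀ r : Int, 0 ≤ r → r ≤ t →
    (pvProdB (PySem.List.pyRange 0 (t + 1) 1) k).filter (fun l => decide (l.sum = r)) = pvCanon r k := by
  induction k with
  | zero =>
    intro r h0 ht
    by_cases hr : r = 0 <;> simp [pvProdB, pvCanon, hr]
    omega
  | succ k1 ih =>
    intro r h0 ht
    rw [pvProdB, pvCanon, List.filter_flatMap]
    set P := pvProdB (PySem.List.pyRange 0 (t + 1) 1) k1 with hP
    have hsplit : PySem.List.pyRange 0 (t + 1) 1
        = PySem.List.pyRange 0 (r + 1) 1 ++ PySem.List.pyRange (r + 1) (t + 1) 1 := by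
      exact PySem.List.pyRange_one_append 0 (r+1) (t+1) (by omega) (by omega)
    rw [hsplit, List.flatMap_append]
    have h2 : (PySem.List.pyRange (r + 1) (t + 1) 1).flatMap
        (fun c => (P.map (c :: ·)).filter (fun l => decide (l.sum = r))) = [] := by
      rw [hP]
      rw [List.flatMap_eq_nil_iff]
      intro c hc
      have hc' := PySem.List.mem_pyRange_one.1 hc
      rw [List.filter_map, List.filter_eq_nil_iff.2, List.map_nil]
      intro l hl
      have := pvProdB_sum_nonneg t k1 l hl
      simp only [Function.comp_apply, List.sum_cons, decide_eq_true_eq]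
      omega
    have h3 : (PySem.List.pyRange (r + 1) (t + 1) 1).flatMap
        (fun c => (pvCanon (r - c) k1).map (c :: ·)) = [] := by
      rw [List.flatMap_eq_nil_iff]
      intro c hc
      have hc' := PySem.List.mem_pyRange_one.1 hc
      rw [pvCanon_neg _ _ (by omega), List.map_nil]
    rw [h2, List.append_nil]
    apply List.flatMap_congr
    intro c hc
    have hc' := PySem.List.mem_pyRange_one.1 hc
    rw [hP, List.filter_map]
    have hcong : List.filter (Function.comp (fun l => decide (l.sum = r)) (c :: ·))
        (pvProdB (PySem.List.pyRange 0 (t + 1) 1) k1)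
        = List.filter (fun l => decide (l.sum = r - c)) (pvProdB (PySem.List.pyRange 0 (t + 1) 1) k1) := by
      apply List.filter_congr
      intro x _
      simp only [Function.comp_apply, List.sum_cons, decide_eq_decide]
      omega
    rw [hcong, ih (r - c) (by omega) (by omega)]

-- the body of the non-leaf loop of pvPartA, at level j with entry remaining r
lemma pvPartA_leaf (elements : List String) (r : Int) (idx : Int) (cur : PySem.Dict String Int)
    (fs : List (List (String × Int))) (e : String) (h : idx = PySem.List.len elements - 1)
    (hg : PySem.List.pyGet? elements idx = some e) :
    pvPartA elements 1 r idx cur fs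
      = if r ≥ 0 then (cur.insert e r, fs ++ [(cur.insert e r).items]) else (cur.insert e r, fs) := by
  rw [pvPartA, if_pos h, hg]

-- L3: full characterisation of the recursive partition enumerator
lemma pvL3 (k : Nat) : ∀ (elements : List String) (j : Nat), j + (k + 1) = elements.length →
    ∀ (r : Int), 0 ≤ r → ∀ (D : PySem.Dict String Int) (fs : List (List (String × Int))),
    D.keys.Nodup →
    ∃ t0 : List Int, t0.length = k + 1 ∧
      pvPartA elements (k + 1) r (j : Int) D fs
        = (pvW D ((elements.drop j).zip t0),
           fs ++ (pvCanon r (k + 1)).map (fun t => (pvW D ((elements.drop j).zip t)).items)) := by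
  induction k with
  | zero =>
    intro elements j hj r hr D fs hD
    refine ⟨[r], rfl, ?_⟩
    have hjlt : j < elements.length := by omega
    have hidx : (j : Int) = PySem.List.len elements - 1 := by
      rw [PySem.List.len_eq]; omega
    have hget : PySem.List.pyGet? elements (j : Int) = some elements[j] := by
      rw [PySem.List.pyGet?_natCast]
      simp [List.getElem?_eq_getElem hjlt]
    rw [pvPartA_leaf elements r j D fs elements[j] hidx hget]
    have hdrop : elements.drop j = [elements[j]] := by
      rw [List.drop_eq_getElem_cons hjlt, List.drop_eq_nil_of_le (by omega)]
    rw [if_pos hr, hdrop, pvCanon_one r hr]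
    rfl
  | succ k1 ih =>
    intro elements j hj r hr D fs hD
    have hjlt : j < elements.length := by omega
    have hdlen : (elements.drop j).length = k1 + 2 := by
      rw [List.length_drop]; omega
    have hne : ¬((j : Int) = PySem.List.len elements - 1) := by
      rw [PySem.List.len_eq]; omega
    have hget : PySem.List.pyGet? elements (j : Int) = some elements[j] := by
      rw [PySem.List.pyGet?_natCast]
      simp [List.getElem?_eq_getElem hjlt]
    set e := elements[j] with he
    have hdrop : elements.drop j = e :: elements.drop (j + 1) := List.drop_eq_getElem_cons hjlt
    have hbody : pvPartA elements (k1 + 1 + 1) r (j : Int) D fs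
        = (PySem.List.pyRange 0 (r + 1) 1).foldl
            (fun st c => pvPartA elements (k1 + 1) (r - c) (((j + 1 : Nat) : Int)) (st.1.insert e c) st.2)
            (D, fs) := by
      rw [pvPartA, if_neg hne, hget]
      push_cast
      rfl
    rw [hbody]
    have SUB : ∀ cs : List Int, (∀ c ∈ cs, 0 ≤ c ∧ c ≤ r) →
        ∀ (D' : PySem.Dict String Int) (fs' : List (List (String × Int))),
        D'.keys.Nodup →
        (D' = D ∨ ∃ s0 : List Int, s0.length = k1 + 2 ∧ D' = pvW D ((elements.drop j).zip s0)) →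
        ∃ S : PySem.Dict String Int,
          cs.foldl (fun st c => pvPartA elements (k1 + 1) (r - c) (((j + 1 : Nat) : Int)) (st.1.insert e c) st.2) (D', fs')
            = (S, fs' ++ cs.flatMap (fun c => (pvCanon (r - c) (k1 + 1)).map
                (fun t => (pvW D ((elements.drop j).zip (c :: t))).items)))
          ∧ S.keys.Nodup
          ∧ (cs = [] → S = D')
          ∧ (cs ≠ [] → ∃ s0 : List Int, s0.length = k1 + 2 ∧ S = pvW D ((elements.drop j).zip s0)) := by
      intro cs
      induction cs with
      | nil =>
        intro _ D' fs' hD' _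
        exact ⟨D', by simp, hD', fun _ => rfl, fun h => absurd rfl h⟩
      | cons c cs ihc =>
        intro hcs D' fs' hD' hRD
        obtain ⟨hc0, hcr⟩ := hcs c (List.mem_cons_self ..)
        rw [List.foldl_cons]
        obtain ⟨t0, ht0len, ht0⟩ := ih elements (j + 1) (by omega) (r - c) (by omega)
            (D'.insert e c) fs' (PySem.Dict.nodup_keys_insert _ _ _ hD')
        have hkey : ∀ t : List Int, t.length = k1 + 1 →
            pvW (D'.insert e c) ((elements.drop (j + 1)).zip t)
              = pvW D ((elements.drop j).zip (c :: t)) := by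
          intro t htl
          have h1 : pvW (D'.insert e c) ((elements.drop (j + 1)).zip t)
              = pvW D' ((elements.drop j).zip (c :: t)) := by
            rw [hdrop, List.zip_cons_cons, pvW_cons]
          rw [h1]
          rcases hRD with rfl | ⟨s0, hs0len, rfl⟩
          · rfl
          · exact pvOW D (elements.drop j) (c :: t) s0 hD (by omega) (by simp [htl]; omega)
        have hmap : (pvCanon (r - c) (k1 + 1)).map
              (fun t => (pvW (D'.insert e c) ((elements.drop (j + 1)).zip t)).items)
            = (pvCanon (r - c) (k1 + 1)).map
              (fun t => (pvW D ((elements.drop j).zip (c :: t))).items) := by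
          apply List.map_congr_left
          intro t ht
          rw [hkey t (pvCanon_length _ _ t ht)]
        rw [ht0, hmap, hkey t0 ht0len]
        obtain ⟨S, hfold, hSnd, hnil, hne'⟩ := ihc (fun c' hc' => hcs c' (List.mem_cons_of_mem _ hc'))
            (pvW D ((elements.drop j).zip (c :: t0)))
            (fs' ++ (pvCanon (r - c) (k1 + 1)).map (fun t => (pvW D ((elements.drop j).zip (c :: t))).items))
            (nodup_keys_pvW _ _ hD)
            (Or.inr ⟨c :: t0, by simp [ht0len], rfl⟩)
        refine ⟨S, ?_, hSnd, ?_, ?_⟩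
        · rw [hfold, List.flatMap_cons, List.append_assoc]
        · intro h; exact absurd h (by simp)
        · intro _
          by_cases hcs0 : cs = []
          · subst hcs0
            exact ⟨c :: t0, by simp [ht0len], hnil rfl⟩
          · exact hne' hcs0
    obtain ⟨S, hfold, _, _, hnonnil⟩ := SUB (PySem.List.pyRange 0 (r + 1) 1)
        (fun c hc => by have := PySem.List.mem_pyRange_one.1 hc; omega) D fs hD (Or.inl rfl)
    have hcsne : PySem.List.pyRange 0 (r + 1) 1 ≠ [] :=
      List.ne_nil_of_mem (PySem.List.mem_pyRange_one.2 ⟨le_refl 0, by omega⟩)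
    obtain ⟨s0, hs0len, hS⟩ := hnonnil hcsne
    refine ⟨s0, by omega, ?_⟩
    rw [hfold, hS]
    have hcanon : (pvCanon r (k1 + 1 + 1)).map (fun t => (pvW D ((elements.drop j).zip t)).items)
        = (PySem.List.pyRange 0 (r + 1) 1).flatMap (fun c => (pvCanon (r - c) (k1 + 1)).map
            (fun t => (pvW D ((elements.drop j).zip (c :: t))).items)) := by
      rw [pvCanon, List.map_flatMap]
      apply List.flatMap_congr
      intro c _
      rw [List.map_map]
      rfl
    rw [hcanon]


lemma pvPartA_neg (elements : List String) (fuel : Nat) (r : Int) (idx : Int)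
    (cur : PySem.Dict String Int) (fs : List (List (String × Int))) (h : r < 0) :
    (pvPartA elements fuel r idx cur fs).2 = fs := by
  cases fuel with
  | zero => rfl
  | succ f =>
    rw [pvPartA]
    by_cases h1 : idx = PySem.List.len elements - 1
    · rw [if_pos h1]
      rcases PySem.List.pyGet? elements idx with _ | e
      · rfl
      · simp only [if_neg (show ¬ r ≥ 0 by omega)]
    · rw [if_neg h1]
      rcases PySem.List.pyGet? elements idx with _ | e
      · rfl
      · rw [pvRange_nil (by omega)]
        rfl

lemma pvFlatMapIf {α β : Type} (l : List α) (p : α → Prop) [DecidablePred p] (g : α → List β) :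
    l.flatMap (fun x => if p x then g x else []) = (l.filter (fun x => decide (p x))).flatMap g := by
  induction l with
  | nil => rfl
  | cons a l ih =>
    by_cases hp : p a
    · simp only [List.flatMap_cons, List.filter_cons, if_pos hp, decide_eq_true hp]
      rw [ih]
      rfl
    · simp only [List.flatMap_cons, List.filter_cons, if_neg hp, decide_eq_false hp]
      rw [ih]
      rfl

lemma pvHeavy (d : PySem.Dict String Int) (hnd : d.keys.Nodup) :
    d.items.foldl (fun s kv => if kv.1 ≠ "H" then s + kv.2 else s) (0 : Int)
      = d.values.sum - d.getD "H" 0 := by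
  have hvals : d.values = d.items.map (fun kv => kv.2) := rfl
  by_cases hc : d.contains "H" = true
  · obtain ⟨v, hv⟩ : ∃ v, d.get? "H" = some v := by
      rw [PySem.Dict.contains_eq_isSome_get?] at hc
      exact Option.isSome_iff_exists.1 hc
    have hgd : d.getD "H" 0 = v := PySem.Dict.getD_of_get?_eq_some d 0 hv
    obtain ⟨l1, l2, hsplit⟩ := List.append_of_mem (PySem.Dict.mem_items_of_get?_eq_some d hv)
    have hkeys : d.keys = d.items.map Prod.fst := rfl
    rw [hkeys, hsplit] at hnd
    rw [List.map_append, List.map_cons, List.nodup_append] at hnd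
    have hH1 : "H" ∉ l1.map Prod.fst := fun hm => hnd.2.2 _ hm _ (List.mem_cons_self ..) rfl
    have hH2 : "H" ∉ l2.map Prod.fst := (List.nodup_cons.1 hnd.2.1).1
    rw [hvals, hsplit, List.foldl_append, List.foldl_cons]
    have hcong1 : l1.foldl (fun s kv => if kv.1 ≠ "H" then s + kv.2 else s) (0 : Int)
        = l1.foldl (fun s kv => s + kv.2) (0 : Int) := by
      apply PySem.List.foldl_congr_mem
      intro acc kv hkv
      rw [if_pos (fun hkH => hH1 (by rw [← hkH]; exact List.mem_map_of_mem hkv))]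
    have hcong2 : ∀ a : Int, l2.foldl (fun s kv => if kv.1 ≠ "H" then s + kv.2 else s) a
        = l2.foldl (fun s kv => s + kv.2) a := by
      intro a
      apply PySem.List.foldl_congr_mem
      intro acc kv hkv
      rw [if_pos (fun hkH => hH2 (by rw [← hkH]; exact List.mem_map_of_mem hkv))]
    rw [hcong1, if_neg (by simp), hcong2]
    simp only [PySem.List.foldl_add, zero_add]
    rw [hgd, List.map_append, List.map_cons, List.sum_append, List.sum_cons]
    ring
  · have hgd : d.getD "H" 0 = 0 :=
      PySem.Dict.getD_of_not_contains d 0 (by simpa using hc)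
    have hcong : d.items.foldl (fun s kv => if kv.1 ≠ "H" then s + kv.2 else s) (0 : Int)
        = d.items.foldl (fun s kv => s + kv.2) (0 : Int) := by
      apply PySem.List.foldl_congr_mem
      intro acc kv hkv
      refine if_pos (fun hkH => ?_)
      have : kv.1 ∈ d.keys := PySem.Dict.mem_keys_of_mem_items d hkv
      rw [hkH] at this
      exact hc ((PySem.Dict.contains_iff_mem_keys d "H").2 this)
    rw [hcong]
    simp only [PySem.List.foldl_add, zero_add]
    rw [hgd, hvals]
    ring

-- the two per-formula post-filters
def pvGA (mi : Int) (f : List (String × Int)) : List (List (String × Int)) :=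
  if (f.foldl (fun s kv => if kv.1 ≠ "H" then s + kv.2 else s) (0 : Int)) ≥ 1
      ∧ (f.foldl (fun s kv => s + kv.2) (0 : Int)) ≥ mi then
    (if f.filter (fun kv => kv.2 > 0) ≠ [] then [f.filter (fun kv => kv.2 > 0)] else [])
  else []

def pvGB (elements : List String) (mi : Int) (tup : List Int) : List (List (String × Int)) :=
  let f := pvW PySem.Dict.empty (elements.zip tup)
  if f.values.sum - f.getD "H" 0 ≥ 1 ∧ f.values.sum ≥ mi then
    (if f.items.filter (fun kv => kv.2 > 0) ≠ [] then [f.items.filter (fun kv => kv.2 > 0)] else [])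
  else []

lemma pvPointwise (elements : List String) (mi : Int) (t : List Int) :
    pvGA mi ((pvW PySem.Dict.empty (elements.zip t)).items) = pvGB elements mi t := by
  have hnd : (pvW PySem.Dict.empty (elements.zip t)).keys.Nodup :=
    nodup_keys_pvW _ _ PySem.Dict.nodup_keys_empty
  have htot : (pvW PySem.Dict.empty (elements.zip t)).items.foldl
      (fun s kv => s + kv.2) (0 : Int) = (pvW PySem.Dict.empty (elements.zip t)).values.sum := by
    simp only [PySem.List.foldl_add, zero_add]
    rfl
  have hheavy := pvHeavy _ hnd
  rw [pvGA, pvGB, htot, hheavy]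

theorem pv_main (elements : List String) (max_atoms min_atoms : Int)
    (hpre : Pre_generate_formulas_py elements max_atoms min_atoms) :
    generate_formulas_py elements max_atoms min_atoms
      = generate_formulas_py_alt elements max_atoms min_atoms := by
  by_cases hnil : elements = []
  · subst hnil
    have hlt : max_atoms < min_atoms := by
      rcases hpre with h | h
      · exact absurd rfl h
      · exact h
    rw [generate_formulas_py, generate_formulas_py_alt, pvRange_nil (by omega)]
    rfl
  · obtain ⟨k, hk⟩ : ∃ k, elements.length = k + 1 := by
      cases elements with
      | nil => exact absurd rfl hnil
      | cons a es => exact ⟨es.length, by simp⟩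
    have hstep : ∀ (fs : List (List (String × Int))) (total : Int),
        (pvPartA elements elements.length total 0 PySem.Dict.empty fs).2
          = fs ++ (pvCanon total (k + 1)).map
              (fun t => (pvW PySem.Dict.empty (elements.zip t)).items) := by
      intro fs total
      by_cases h0 : 0 ≤ total
      · obtain ⟨t0, _, heq⟩ := pvL3 k elements 0 (by omega) total h0 PySem.Dict.empty fs
          PySem.Dict.nodup_keys_empty
        simp only [Nat.cast_zero, List.drop_zero] at heq
        rw [hk, heq]
      · rw [hk, pvPartA_neg _ _ _ _ _ _ (by omega), pvCanon_neg _ _ (by omega), List.map_nil,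
          List.append_nil]
    have hA : generate_formulas_py elements max_atoms min_atoms
        = (PySem.List.pyRange min_atoms (max_atoms + 1) 1).flatMap
            (fun total => ((pvCanon total (k + 1)).map
                (fun t => (pvW PySem.Dict.empty (elements.zip t)).items)).flatMap
              (pvGA min_atoms)) := by
      rw [generate_formulas_py]
      have h1 : (PySem.List.pyRange min_atoms (max_atoms + 1) 1).foldl
          (fun fs total => (pvPartA elements elements.length total 0 PySem.Dict.empty fs).2)
          ([] : List (List (String × Int)))
          = (PySem.List.pyRange min_atoms (max_atoms + 1) 1).flatMap
              (fun total => (pvCanon total (k + 1)).map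
                (fun t => (pvW PySem.Dict.empty (elements.zip t)).items)) := by
        rw [PySem.List.foldl_congr_mem _ _
            (fun fs total => fs ++ (pvCanon total (k + 1)).map
              (fun t => (pvW PySem.Dict.empty (elements.zip t)).items)) _
            (fun acc x _ => hstep acc x)]
        rw [PySem.List.foldl_append_eq_flatMap]
        rfl
      rw [h1]
      have h2 : ∀ (fs : List (List (String × Int))),
          fs.foldl (fun (valid : List (List (String × Int))) (f : List (String × Int)) =>
            let n_heavy := f.foldl (fun s kv => if kv.1 ≠ "H" then s + kv.2 else s) (0 : Int)
            let n_total := f.foldl (fun s kv => s + kv.2) (0 : Int)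
            if n_heavy ≥ 1 ∧ n_total ≥ min_atoms then
              let clean := f.filter (fun kv => kv.2 > 0)
              if clean ≠ [] then valid ++ [clean] else valid
            else valid) ([] : List (List (String × Int)))
          = fs.flatMap (pvGA min_atoms) := by
        intro fs
        rw [PySem.List.foldl_congr_mem _ _
            (fun valid f => valid ++ pvGA min_atoms f) _ ?_]
        · rw [PySem.List.foldl_append_eq_flatMap]
          rfl
        · intro acc f _
          simp only [pvGA]
          split_ifs <;> simp
      rw [h2, List.flatMap_assoc]
    have hB : generate_formulas_py_alt elements max_atoms min_atoms
        = (PySem.List.pyRange min_atoms (max_atoms + 1) 1).flatMap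
            (fun total => (pvProdB (PySem.List.pyRange 0 (total + 1) 1) (k + 1)).flatMap
              (fun tup => if tup.sum = total then pvGB elements min_atoms tup else [])) := by
      rw [generate_formulas_py_alt, hk]
      have h1 : ∀ (total : Int) (valid : List (List (String × Int))),
          (pvProdB (PySem.List.pyRange 0 (total + 1) 1) (k + 1)).foldl
            (fun (valid : List (List (String × Int))) (tup : List Int) =>
              if tup.sum = total then
                let f := (elements.zip tup).foldl (fun d kv => d.insert kv.1 kv.2) PySem.Dict.empty
                let s := f.values.sum
                if s - f.getD "H" 0 ≥ 1 ∧ s ≥ min_atoms then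
                  let clean := f.items.filter (fun kv => kv.2 > 0)
                  if clean ≠ [] then valid ++ [clean] else valid
                else valid
              else valid) valid
          = valid ++ (pvProdB (PySem.List.pyRange 0 (total + 1) 1) (k + 1)).flatMap
              (fun tup => if tup.sum = total then pvGB elements min_atoms tup else []) := by
        intro total valid
        rw [PySem.List.foldl_congr_mem _ _
            (fun valid tup => valid ++ if tup.sum = total then pvGB elements min_atoms tup else []) _ ?_]
        · rw [PySem.List.foldl_append_eq_flatMap]
        · intro acc tup _
          simp only [pvGB, pvW]
          split_ifs <;> simp
      rw [PySem.List.foldl_congr_mem _ _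
          (fun (valid : List (List (String × Int))) (total : Int) =>
            valid ++ (pvProdB (PySem.List.pyRange 0 (total + 1) 1) (k + 1)).flatMap
              (fun tup => if tup.sum = total then pvGB elements min_atoms tup else [])) _
          (fun acc total _ => h1 total acc)]
      rw [PySem.List.foldl_append_eq_flatMap]
      rfl
    rw [hA, hB]
    apply List.flatMap_congr
    intro total _
    by_cases h0 : 0 ≤ total
    · rw [List.flatMap_map]
      have hL : (pvCanon total (k + 1)).flatMap
            (fun t => pvGA min_atoms ((pvW PySem.Dict.empty (elements.zip t)).items))
          = (pvCanon total (k + 1)).flatMap (pvGB elements min_atoms) :=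
        List.flatMap_congr (fun t _ => pvPointwise elements min_atoms t)
      rw [hL, pvFlatMapIf _ (fun tup => tup.sum = total) (pvGB elements min_atoms),
        pvFilterProd total (k + 1) total h0 le_rfl]
    · rw [pvCanon_neg _ _ (by omega), pvRange_nil (show total + 1 ≤ 0 by omega)]
      have : pvProdB ([] : List Int) (k + 1) = [] := by rw [pvProdB]; rfl
      rw [this]
      rfl

-- ===== VERDICT (by name: the statement is the Claim_ definition above) =====
theorem generate_formulas_py_spec : Claim_equal_generate_formulas_py := by
  intro elements max_atoms min_atoms _ hpre
  exact pv_main elements max_atoms min_atoms hpre
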